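-- pv_equiv track=rewrite | github.com/JPCervantes/junior-python-developer-coding-task-master | tsv_formatter.py | order_list_by_length
-- ===== SOURCE A (Python) =====
-- def order_list_by_length(array_list) -> list:
--     """This function sort the data by the length of the lists to return
--     the new list sorted by the longest element in the list."""
--
--     max_length = len(array_list[0])
--     total_length = len(array_list)
--     result = []
--
--     for index in range(0, total_length):
--         if len(array_list[index]) > max_length:
--             result.insert(0, array_list[index])
--             max_length = len(array_list[index])
--         else:
--             result.append(array_list[index])
--
--     return result
-- ===== SOURCE B (Python) =====
-- def order_list_by_length(array_list) -> list:
--     records, others = [], []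
--     max_length = len(array_list[0])
--     for arr in array_list:
--         if len(arr) > max_length:
--             records.append(arr)
--             max_length = len(arr)
--         else:
--             others.append(arr)
--     return records[::-1] + others
-- ===== Notes on version B (the rewrite author's own statement) =====
-- stated objective: alternative
-- what changed: Replaces A's single result list maintained with insert(0)/append by one pass that collects records and others into two separate append-only lists, returning reversed(records)+others; intended to avoid insert(0)'s O(n) shifting (O(n^2) worst case vs O(n)), but a timing run measured only 1.22x at the largest size, so no speed is claimed.
import Mathlib
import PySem

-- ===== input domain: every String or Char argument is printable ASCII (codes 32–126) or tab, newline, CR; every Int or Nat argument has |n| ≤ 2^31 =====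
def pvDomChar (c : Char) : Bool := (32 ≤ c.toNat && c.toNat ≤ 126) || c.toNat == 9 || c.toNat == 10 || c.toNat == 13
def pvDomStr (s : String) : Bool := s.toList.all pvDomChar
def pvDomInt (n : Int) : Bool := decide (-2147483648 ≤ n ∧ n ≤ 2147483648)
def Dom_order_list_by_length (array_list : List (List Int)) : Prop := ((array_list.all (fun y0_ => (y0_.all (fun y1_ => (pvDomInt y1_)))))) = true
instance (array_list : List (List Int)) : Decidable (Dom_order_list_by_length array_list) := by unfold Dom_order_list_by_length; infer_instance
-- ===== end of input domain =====

-- B replaces A's single result list maintained with insert(0)/append by one pass into two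
-- append-only lists (records, others), concatenated once at the end (timing did not confirm a speed-up).

-- ===== PORT A =====
-- Literal port of A: index loop over range(0, total_length), one result list,
-- insert(0, x) = x :: result, append = result ++ [x]. array_list[0] is pyGetD with
-- default [], reached only under Pre_ (array_list ≠ []); in-loop indices are in range.
def order_list_by_length (array_list : List (List Int)) : List (List Int) :=
  let max_length : Int := ((PySem.List.pyGetD array_list 0 []).length : Int)
  let total_length : Int := (array_list.length : Int)
  (((PySem.List.pyRange 0 total_length 1).foldl
      (fun (st : List (List Int) × Int) index =>
        let x := PySem.List.pyGetD array_list index []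
        if (x.length : Int) > st.2 then (x :: st.1, (x.length : Int))
        else (st.1 ++ [x], st.2))
      ([], max_length))).1

-- ===== PORT B =====
-- Port of Source B: fold directly over the elements keeping (records, others, max_length);
-- records[::-1] is ported as List.reverse (exact for a step -1 full slice).
def order_list_by_length_alt (array_list : List (List Int)) : List (List Int) :=
  let st := array_list.foldl
      (fun (st : List (List Int) × List (List Int) × Int) arr =>
        if (arr.length : Int) > st.2.2 then (st.1 ++ [arr], st.2.1, (arr.length : Int))
        else (st.1, st.2.1 ++ [arr], st.2.2))
      ([], [], ((PySem.List.pyGetD array_list 0 []).length : Int))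
  st.1.reverse ++ st.2.1

-- ===== PRECONDITION & SPEC =====
-- A evaluates array_list[0] first: on the empty list it raises IndexError, so Pre_ excludes it.
def Pre_order_list_by_length (array_list : List (List Int)) : Prop := array_list ≠ []
instance (array_list : List (List Int)) : Decidable (Pre_order_list_by_length array_list) := by unfold Pre_order_list_by_length; infer_instance
def pvWitness_order_list_by_length : List (List Int) := [[0]]

def Spec_order_list_by_length (array_list : List (List Int)) (out : List (List Int)) : Prop := out = order_list_by_length_alt array_list
instance (array_list : List (List Int)) (out : List (List Int)) : Decidable (Spec_order_list_by_length array_list out) := by unfold Spec_order_list_by_length; infer_instance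

-- ===== CLAIM (what is proved, stated in full; the proofs are below) =====
def Claim_equal_order_list_by_length : Prop := ∀ (array_list : List (List Int)), Dom_order_list_by_length array_list → Pre_order_list_by_length array_list → Spec_order_list_by_length array_list (order_list_by_length array_list)

-- ===== LEMMAS AND PROOFS =====

-- Invariant: A's single accumulator equals B's reversed records ++ others at every step.
lemma olbl_fold_inv (xs : List (List Int)) (recs oths : List (List Int)) (ml : Int) :
    (xs.foldl
      (fun (st : List (List Int) × Int) x =>
        if (x.length : Int) > st.2 then (x :: st.1, (x.length : Int))
        else (st.1 ++ [x], st.2))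
      (recs.reverse ++ oths, ml)).1 =
    (let st := xs.foldl
      (fun (st : List (List Int) × List (List Int) × Int) arr =>
        if (arr.length : Int) > st.2.2 then (st.1 ++ [arr], st.2.1, (arr.length : Int))
        else (st.1, st.2.1 ++ [arr], st.2.2))
      (recs, oths, ml);
     st.1.reverse ++ st.2.1) := by
  induction xs generalizing recs oths ml with
  | nil => simp
  | cons x t ih =>
    simp only [List.foldl_cons]
    by_cases h : (x.length : Int) > ml
    · simp only [h, if_pos]
      have : x :: (recs.reverse ++ oths) = (recs ++ [x]).reverse ++ oths := by simp
      rw [this]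
      exact ih (recs ++ [x]) oths _
    · simp only [h, if_false]
      have : (recs.reverse ++ oths) ++ [x] = recs.reverse ++ (oths ++ [x]) := by simp
      rw [this]
      exact ih recs (oths ++ [x]) ml

-- ===== VERDICT (by name: the statement is the Claim_ definition above) =====
theorem order_list_by_length_spec : Claim_equal_order_list_by_length := by
  intro xs _ _
  show order_list_by_length xs = order_list_by_length_alt xs
  show ((PySem.List.pyRange 0 (xs.length : Int) 1).foldl
      (fun (st : List (List Int) × Int) index =>
        (fun (st : List (List Int) × Int) x =>
          if (x.length : Int) > st.2 then (x :: st.1, (x.length : Int))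
          else (st.1 ++ [x], st.2)) st (PySem.List.pyGetD xs index []))
      ([], ((PySem.List.pyGetD xs 0 []).length : Int))).1 = order_list_by_length_alt xs
  rw [PySem.List.foldl_pyRange_zero_pyGetD' xs []
    (fun (st : List (List Int) × Int) x =>
      if (x.length : Int) > st.2 then (x :: st.1, (x.length : Int))
      else (st.1 ++ [x], st.2))]
  exact olbl_fold_inv xs [] [] _
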